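-- pv_equiv track=rewrite | github.com/hadamrd/pydofus2 | pydofus2/com/ankamagames/dofus/logic/game/fight/types/castSpellManager/SpellManager.py | splitTriggers
-- ===== SOURCE A (Python) =====
-- def splitTriggers(param: str) -> list:
--     result = []
--     if param:
--         i = 0
--         while i < len(param):
--             while i < len(param) and (param[i] == " " or param[i] == "|"):
--                 i += 1
--             start = i
--             while i < len(param) and param[i] != "|":
--                 i += 1
--             if i != start:
--                 result.append(param[start:i])
--     return result
-- ===== SOURCE B (Python) =====
-- def splitTriggers(param: str) -> list:
--     if not param:
--         return []
--     return [t for t in (seg.lstrip(' ') for seg in param.split('|')) if t]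
-- ===== Notes on version B (the rewrite author's own statement) =====
-- stated objective: idiomatic
-- what changed: Replaced A's manual index-walking while-loops with a single split on the bar separator, each segment left-stripped of spaces and kept only if non-empty.
import Mathlib
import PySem

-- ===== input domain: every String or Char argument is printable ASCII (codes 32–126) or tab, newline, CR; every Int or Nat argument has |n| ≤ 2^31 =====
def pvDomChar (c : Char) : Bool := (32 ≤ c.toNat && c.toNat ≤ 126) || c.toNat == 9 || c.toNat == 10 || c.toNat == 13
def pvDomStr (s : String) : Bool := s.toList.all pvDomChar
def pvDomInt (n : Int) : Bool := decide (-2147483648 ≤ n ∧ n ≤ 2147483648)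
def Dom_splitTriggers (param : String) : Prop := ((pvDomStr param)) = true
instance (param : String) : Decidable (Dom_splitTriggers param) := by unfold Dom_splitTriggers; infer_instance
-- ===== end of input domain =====

-- B replaces A's index-walking while-loops by split('|') + lstrip(' ') + drop-empty (objective: idiomatic; a timing run measured B faster by a constant factor).

-- ===== PORT A =====
-- A's outer while: skip a run of ' '/'|' chars, take the run up to the next '|', append it
-- if non-empty, repeat.  Fuel only bounds the iteration count (each iteration consumes >= 1 char).
def pvALoop : Nat → List Char → List String → List String
  | 0, _, acc => acc
  | fuel + 1, cs, acc =>
    match cs.dropWhile (fun c => c == ' ' || c == '|') with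
    | [] => acc
    | c :: rest =>
        let tok := (c :: rest).takeWhile (fun d => !(d == '|'))
        let rest' := (c :: rest).dropWhile (fun d => !(d == '|'))
        pvALoop fuel rest' (acc ++ [String.mk tok])

def splitTriggers (param : String) : List String :=
  if param ≠ "" then pvALoop (param.toList.length + 1) param.toList [] else []

-- ===== PORT B =====
-- Source B: if not param: return []; [t for t in (seg.lstrip(' ') for seg in param.split('|')) if t]
-- seg.lstrip(' ') (strip only the space character, left side) is ported by hand as dropWhile (== ' '); exact.
def splitTriggers_alt (param : String) : List String :=
  if param ≠ "" then
    ((PySem.Chars.splitOn param.toList ['|']).map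
        (fun seg => String.mk (seg.dropWhile (fun c => c == ' ')))).filter
      (fun t => t ≠ "")
  else []

-- ===== PRECONDITION & SPEC =====
def Spec_splitTriggers (param : String) (out : List String) : Prop := out = splitTriggers_alt param
instance (param : String) (out : List String) : Decidable (Spec_splitTriggers param out) := by unfold Spec_splitTriggers; infer_instance

-- ===== CLAIM (what is proved, stated in full; the proofs are below) =====
def Claim_equal_splitTriggers : Prop := ∀ (param : String), Dom_splitTriggers param → Spec_splitTriggers param (splitTriggers param)

-- ===== LEMMAS AND PROOFS =====

def mySplit : List Char → List (List Char)
  | [] => [[]]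
  | c :: t => if c = '|' then [] :: mySplit t else (mySplit t).modifyHead (c :: ·)

theorem mySplit_ne_nil : ∀ (cs : List Char), mySplit cs ≠ []
  | [] => by simp [mySplit]
  | c :: t => by
    have := mySplit_ne_nil t
    simp only [mySplit]
    split
    · simp
    · cases h : mySplit t <;> simp_all [List.modifyHead]

theorem go_spec : ∀ (l : List Char) (fuel : Nat) (cur : List Char) (acc : List (List Char)),
    l.length ≤ fuel →
    PySem.Chars.splitOn.go ['|'] fuel l cur acc
      = acc.reverse ++ (mySplit l).modifyHead (cur.reverse ++ ·) := by
  intro l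
  induction l with
  | nil =>
    intro fuel cur acc _
    cases fuel <;> simp [PySem.Chars.splitOn.go, mySplit, List.modifyHead]
  | cons c rest ih =>
    intro fuel cur acc hle
    cases fuel with
    | zero => simp at hle
    | succ n =>
      have hr : rest.length ≤ n := by simpa using hle
      obtain ⟨h, tl, hX⟩ : ∃ h tl, mySplit rest = h :: tl := by
        cases hX : mySplit rest with
        | nil => exact absurd hX (mySplit_ne_nil rest)
        | cons h tl => exact ⟨h, tl, rfl⟩
      by_cases hc : c = '|'
      · subst hc
        simp only [PySem.Chars.splitOn.go, List.isPrefixOf, beq_self_eq_true,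
          Bool.and_eq_true, and_true, if_pos, List.length_cons, List.length_nil, List.drop]
        rw [ih n [] (cur.reverse :: acc) hr]
        simp [mySplit, hX, List.modifyHead]
      · simp only [PySem.Chars.splitOn.go]
        rw [if_neg (by simp [List.isPrefixOf]; exact fun e => hc e.symm)]
        rw [ih n (c :: cur) acc hr]
        simp [mySplit, hc, hX, List.modifyHead]

theorem splitOn_eq_mySplit (cs : List Char) : PySem.Chars.splitOn cs ['|'] = mySplit cs := by
  unfold PySem.Chars.splitOn
  rw [go_spec cs (cs.length + 1) [] [] (Nat.le_succ _)]
  obtain ⟨h, tl, hX⟩ : ∃ h tl, mySplit cs = h :: tl := by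
    cases hX : mySplit cs with
    | nil => exact absurd hX (mySplit_ne_nil cs)
    | cons h tl => exact ⟨h, tl, rfl⟩
  simp [hX, List.modifyHead]

def bSegs (cs : List Char) : List (List Char) :=
  ((mySplit cs).map (fun seg => seg.dropWhile (fun c => c == ' '))).filter (fun t => t ≠ [])

theorem mySplit_take_drop : ∀ (cs : List Char),
    mySplit cs = cs.takeWhile (fun d => !(d == '|')) ::
      (match cs.dropWhile (fun d => !(d == '|')) with
       | [] => ([] : List (List Char))
       | _ :: r => mySplit r) := by
  intro cs
  induction cs with
  | nil => simp [mySplit]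
  | cons c t ih =>
    by_cases hc : c = '|'
    · subst hc; simp [mySplit, List.takeWhile, List.dropWhile]
    · obtain ⟨h, tl, hX⟩ : ∃ h tl, mySplit t = h :: tl := by
        cases hX : mySplit t with
        | nil => exact absurd hX (mySplit_ne_nil t)
        | cons h tl => exact ⟨h, tl, rfl⟩
      rw [hX] at ih
      simp only [mySplit, if_neg hc, hX, List.modifyHead, List.takeWhile, List.dropWhile,
        show (c == '|') = false by simp [hc]]
      simp only [Bool.not_false, List.cons.injEq] at ih ⊢
      simp [ih.1, ih.2]

theorem bSegs_space (t : List Char) : bSegs (' ' :: t) = bSegs t := by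
  obtain ⟨h, tl, hX⟩ : ∃ h tl, mySplit t = h :: tl := by
    cases hX : mySplit t with
    | nil => exact absurd hX (mySplit_ne_nil t)
    | cons h tl => exact ⟨h, tl, rfl⟩
  simp [bSegs, mySplit, hX, List.modifyHead, List.dropWhile]

theorem bSegs_bar (t : List Char) : bSegs ('|' :: t) = bSegs t := by
  simp [bSegs, mySplit, List.dropWhile]

theorem bSegs_head (c : Char) (t : List Char) (hc1 : c ≠ ' ') (hc2 : c ≠ '|') :
    bSegs (c :: t) = (c :: t.takeWhile (fun d => !(d == '|'))) ::
      (match t.dropWhile (fun d => !(d == '|')) with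
       | [] => ([] : List (List Char))
       | _ :: r => bSegs r) := by
  have h := mySplit_take_drop (c :: t)
  simp only [List.takeWhile, List.dropWhile, show (c == '|') = false by simp [hc2],
    Bool.not_false] at h
  cases hdw : t.dropWhile (fun d => !(d == '|')) with
  | nil =>
    rw [hdw] at h
    rw [bSegs, h]
    simp [List.dropWhile, show (c == ' ') = false by simp [hc1]]
  | cons d r =>
    rw [hdw] at h
    rw [bSegs, h]
    simp [List.filter_cons, List.dropWhile, show (c == ' ') = false by simp [hc1], bSegs]

theorem head_dropWhile_bar : ∀ (t : List Char) (d : Char) (r : List Char),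
    t.dropWhile (fun d => !(d == '|')) = d :: r → d = '|'
  | [], d, r, hdw => by simp at hdw
  | a :: t, d, r, hdw => by
    by_cases ha : a = '|'
    · simp [List.dropWhile, ha] at hdw
      exact hdw.1.symm
    · simp only [List.dropWhile, show (a == '|') = false by simp [ha], Bool.not_false] at hdw
      exact head_dropWhile_bar t d r hdw

theorem aLoop_eq : ∀ (n : Nat) (cs : List Char) (acc : List String) (fuel : Nat),
    cs.length ≤ n → cs.length < fuel →
    pvALoop fuel cs acc = acc ++ (bSegs cs).map String.mk := by
  intro n
  induction n with
  | zero =>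
    intro cs acc fuel h1 h2
    have : cs = [] := List.eq_nil_of_length_eq_zero (Nat.le_zero.mp h1)
    subst this
    cases fuel with
    | zero => omega
    | succ m => simp [pvALoop, bSegs, mySplit]
  | succ n ih =>
    intro cs acc fuel h1 h2
    cases fuel with
    | zero => omega
    | succ m =>
      cases cs with
      | nil => simp [pvALoop, bSegs, mySplit]
      | cons c t =>
        by_cases hsep : c = ' ' ∨ c = '|'
        · have hpred : (fun x => x == ' ' || x == '|') c = true := by
            rcases hsep with h | h <;> simp [h]
          have hbody : pvALoop (m+1) (c::t) acc = pvALoop (m+1) t acc := by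
            simp only [pvALoop, List.dropWhile, hpred]
          rw [hbody, ih t acc (m+1) (by simpa using h1) (by simp at h2 ⊢; omega)]
          rcases hsep with h | h <;> subst h
          · rw [bSegs_space]
          · rw [bSegs_bar]
        · push_neg at hsep
          obtain ⟨hc1, hc2⟩ := hsep
          have hpred : (fun x => x == ' ' || x == '|') c = false := by simp [hc1, hc2]
          have hstep : pvALoop (m+1) (c::t) acc =
              pvALoop m (t.dropWhile (fun d => !(d == '|')))
                (acc ++ [String.mk (c :: t.takeWhile (fun d => !(d == '|')))]) := by
            simp [pvALoop, List.dropWhile, List.takeWhile,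
              show (c == '|') = false by simp [hc2], show (c == ' ') = false by simp [hc1]]
          have hlen : (t.dropWhile (fun d => !(d == '|'))).length ≤ t.length :=
            List.length_dropWhile_le _ _
          rw [hstep, ih _ _ m (by simp at h1; omega) (by simp at h2; omega)]
          rw [bSegs_head c t hc1 hc2]
          cases hdw : t.dropWhile (fun d => !(d == '|')) with
          | nil => simp [hdw, bSegs, mySplit]
          | cons d r =>
            have hd : d = '|' := head_dropWhile_bar t d r hdw
            subst hd
            simp [hdw, bSegs_bar]

theorem toList_mk (x : List Char) : (String.mk x).toList = x := by
  exact Eq.symm (String.ofList_eq.mp rfl)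

theorem mk_eq_empty (x : List Char) : (String.mk x = "") ↔ x = [] := by
  constructor
  · intro h
    have h2 := congrArg String.toList h
    rw [toList_mk] at h2
    simpa using h2
  · rintro rfl; rfl

theorem alt_eq (param : String) :
    splitTriggers_alt param = if param ≠ "" then (bSegs param.toList).map String.mk else [] := by
  unfold splitTriggers_alt
  split
  · rw [splitOn_eq_mySplit, bSegs]
    rw [show (fun seg => String.mk (List.dropWhile (fun c => c == ' ') seg))
          = String.mk ∘ (fun seg => List.dropWhile (fun c => c == ' ') seg) from rfl]
    rw [← List.map_map, List.filter_map]
    congr 1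
    apply List.filter_congr
    intro x _
    simp [Function.comp, mk_eq_empty]
  · rfl

-- ===== VERDICT (by name: the statement is the Claim_ definition above) =====
theorem splitTriggers_spec : Claim_equal_splitTriggers := by
  intro param _
  unfold Spec_splitTriggers splitTriggers
  rw [alt_eq]
  split
  · exact (aLoop_eq param.toList.length param.toList [] (param.toList.length + 1) le_rfl (Nat.lt_succ_self _)).trans (by simp)
  · rfl
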